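-- pv_equiv track=rewrite | github.com/bquant90/Short-Encoding-Words | shortest_encoding_words.py | shortest_ref_string
-- ===== SOURCE A (Python) =====
-- def shortest_ref_string(words: list[str]) -> tuple[str, int]:
--   word_set = set(words)
--   word_indices = {word: i for i, word in enumerate(words)}  # Create a dictionary to store word indices.
--
--   # The for loop eliminate words from the set that are suffixes (string of letters that go after a word, like pain-ful, where 'ful' is the suffix.) of other words in the words list, as they are not needed in the final reference string.
--   for word in list(word_set):
--     for i in range(1, len(word)):
--       word_set.discard(word[i:])
--
--   sorted_words = sorted(word_set, key=lambda word: word_indices[word])  # Get word indices from the dictionary.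
--   ans = f"{'#'.join(sorted_words)}#"
--   return ans, len(ans)
-- ===== SOURCE B (Python) =====
-- def shortest_ref_string(words: list[str]) -> tuple[str, int]:
--     # Trie of reversed words: a word is redundant iff it is a nonempty proper
--     # suffix of another word, i.e. its reversal is a proper prefix of another
--     # reversal, i.e. its end node in the trie has children.  (The empty word is
--     # never such a suffix, so it is always kept.)
--     root = {}
--     for w in set(words):
--         node = root
--         for c in reversed(w):
--             node = node.setdefault(c, {})
--     seen = set()
--     rev_kept = []
--     for w in reversed(words):
--         if w not in seen:
--             seen.add(w)
--             node = root
--             for c in reversed(w):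
--                 node = node[c]
--             if not w or not node:
--                 rev_kept.append(w)
--     ans = "#".join(reversed(rev_kept)) + "#"
--     return ans, len(ans)
-- ===== Notes on version B (the rewrite author's own statement) =====
-- stated objective: alternative
-- what changed: A eliminates suffix-words by slicing every proper suffix of every word and discarding it from a set, then sorts survivors by an index dictionary; B inserts each distinct word reversed into a trie (a word is redundant iff its end node has children) and recovers the order with a reverse traversal keeping last occurrences, with no suffix slicing and no sort.
import Mathlib
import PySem

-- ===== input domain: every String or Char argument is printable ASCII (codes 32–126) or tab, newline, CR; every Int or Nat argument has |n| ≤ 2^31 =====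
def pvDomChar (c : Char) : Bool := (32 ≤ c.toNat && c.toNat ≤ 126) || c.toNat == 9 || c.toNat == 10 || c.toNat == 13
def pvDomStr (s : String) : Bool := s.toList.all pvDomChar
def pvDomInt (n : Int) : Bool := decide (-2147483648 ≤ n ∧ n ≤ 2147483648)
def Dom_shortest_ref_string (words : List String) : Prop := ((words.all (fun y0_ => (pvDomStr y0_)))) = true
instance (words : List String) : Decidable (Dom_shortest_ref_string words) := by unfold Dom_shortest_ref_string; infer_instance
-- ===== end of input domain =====

-- B replaces A's quadratic suffix-slicing elimination and index-keyed sort by a trie of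
-- reversed words (a word is redundant iff its end node has children) and a reverse
-- traversal keeping last occurrences; objective: alternative (no suffix slicing, no sort).

-- ===== PORT A =====
def shortest_ref_string (words : List String) : String × Int :=
  let word_set : PySem.Set String := PySem.Set.ofList words
  let word_indices : PySem.Dict String Int :=
    (PySem.List.enumerate words 0).foldl (fun d p => d.insert p.2 p.1) PySem.Dict.empty
  let word_set2 : PySem.Set String :=
    word_set.foldl (fun ws word =>
      (PySem.List.pyRange 1 (PySem.Str.len word) 1).foldl
        (fun ws i => PySem.Set.discard ws (PySem.Str.slice word (some i) none)) ws) word_set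
  let sorted_words := PySem.List.sorted word_set2 (fun w => word_indices.getD w 0) false
  let ans := PySem.Str.join "#" sorted_words ++ "#"
  (ans, PySem.Str.len ans)

-- ===== PORT B =====
-- B's trie of reversed words: a Python dict-of-dicts {char: subtrie}.  A nested
-- inductive is not allowed, so the children dict is a mutual sibling type.
mutual
inductive PTrie where
  | mk : PTrieChildren → PTrie
inductive PTrieChildren where
  | nil : PTrieChildren
  | cons : Char → PTrie → PTrieChildren → PTrieChildren
end

def PTrie.children : PTrie → PTrieChildren
  | .mk ch => ch

-- node.get(c): first (only) binding of c in the children dict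
def childGet? : PTrieChildren → Char → Option PTrie
  | .nil, _ => none
  | .cons d t rest, c => if c = d then some t else childGet? rest c

-- node[c] = v: overwrite in place, append if absent (Python dict semantics)
def childSet : PTrieChildren → Char → PTrie → PTrieChildren
  | .nil, c, v => .cons c v .nil
  | .cons d t rest, c, v => if d = c then .cons d v rest else .cons d t (childSet rest c v)

def isNilC : PTrieChildren → Bool
  | .nil => true
  | .cons _ _ _ => false

-- B's 'node = root; for c in reversed(w): node = node.setdefault(c, {})'
def trieInsert (t : PTrie) : List Char → PTrie
  | [] => t
  | c :: cs =>
    .mk (childSet t.children c (trieInsert ((childGet? t.children c).getD (.mk .nil)) cs))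

-- B's 'node = root; for c in reversed(w): node = node[c]'; none = KeyError
def trieGet? (t : PTrie) : List Char → Option PTrie
  | [] => some t
  | c :: cs =>
    match childGet? t.children c with
    | none => none
    | some u => trieGet? u cs

-- B's membership walk + 'if not w or not node'; the none (KeyError) branch is
-- unreachable in the loop below because every looked-up word was inserted first
def pvKeep (root : PTrie) (w : String) : Bool :=
  (w == "") ||
    (match trieGet? root w.toList.reverse with
     | some u => isNilC u.children
     | none => false)

def shortest_ref_string_alt (words : List String) : String × Int :=
  let root : PTrie := (PySem.Set.ofList words).foldl
      (fun r w => trieInsert r w.toList.reverse) (PTrie.mk PTrieChildren.nil)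
  let p := words.reverse.foldl
      (fun (p : PySem.Set String × List String) w =>
        if PySem.Set.contains p.1 w then p
        else (PySem.Set.add p.1 w, if pvKeep root w then p.2 ++ [w] else p.2))
      (PySem.Set.empty, [])
  let ans := PySem.Str.join "#" p.2.reverse ++ "#"
  (ans, PySem.Str.len ans)

-- ===== PRECONDITION & SPEC =====
def Spec_shortest_ref_string (words : List String) (out : String × Int) : Prop :=
  out = shortest_ref_string_alt words
instance (words : List String) (out : String × Int) : Decidable (Spec_shortest_ref_string words out) := by
  unfold Spec_shortest_ref_string; infer_instance

-- ===== CLAIM (what is proved, stated in full; the proofs are below) =====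
def Claim_equal_shortest_ref_string : Prop :=
  ∀ (words : List String), Dom_shortest_ref_string words →
    Spec_shortest_ref_string words (shortest_ref_string words)

-- ===== LEMMAS AND PROOFS =====

-- the proper suffixes of w, as A enumerates them
def pvSufs (w : String) : List String :=
  (PySem.List.pyRange 1 (PySem.Str.len w) 1).map (fun i => PySem.Str.slice w (some i) none)

-- the index dictionary A builds
def pvBuild (l : List String) : PySem.Dict String Int :=
  (PySem.List.enumerate l 0).foldl (fun d p => d.insert p.2 p.1) PySem.Dict.empty

theorem pvBuild_append (t : List String) (x : String) :
    pvBuild (t ++ [x]) = (pvBuild t).insert x (t.length : Int) := by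
  simp [pvBuild, PySem.List.enumerate_append, List.foldl_append,
        PySem.List.enumerate_cons, PySem.List.enumerate_nil]

theorem pvBuild_lt (l : List String) (w : String) (i : Int)
    (h : (pvBuild l).get? w = some i) : i < (l.length : Int) := by
  induction l using List.reverseRecOn generalizing i with
  | nil => simp [pvBuild, PySem.Dict.get?_empty] at h
  | append_singleton t x ih =>
    rw [pvBuild_append, PySem.Dict.get?_insert] at h
    simp only [List.length_append, List.length_cons, List.length_nil]
    split_ifs at h with hw
    · have : (t.length : Int) = i := by simpa using h
      omega
    · have := ih i h
      omega

-- a foldl of discards is one filter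
theorem pvDiscard_foldl (xs : List String) (s : List String) :
    xs.foldl PySem.Set.discard s = s.filter (fun y => !xs.contains y) := by
  induction xs generalizing s with
  | nil => simp
  | cons x xs ih =>
    simp only [List.foldl_cons, ih, PySem.Set.discard, List.filter_filter]
    apply List.filter_congr
    intro y _
    by_cases h1 : y = x <;> by_cases h2 : y ∈ xs <;>
      simp [h1, h2]

-- A's nested elimination loop, flattened
theorem pvDouble (D : List String) (s : List String) :
    D.foldl (fun ws word => (pvSufs word).foldl
        (fun ws i => PySem.Set.discard ws i) ws) s
      = (D.flatMap pvSufs).foldl PySem.Set.discard s := by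
  induction D generalizing s with
  | nil => simp
  | cons d D ih => simp [List.foldl_append, ih]

-- B's traversal: the accumulated pair is (set of processed, kept ones in order)
theorem pvBloop (q : String → Bool) (l : List String) (s : PySem.Set String) :
    (l.foldl (fun (p : PySem.Set String × List String) w =>
        if PySem.Set.contains p.1 w then p
        else (PySem.Set.add p.1 w, if q w then p.2 ++ [w] else p.2))
      (s, s.filter q)).2
    = (PySem.Set.update s l).filter q := by
  induction l generalizing s with
  | nil => simp [PySem.Set.update]
  | cons x l ih =>
    simp only [List.foldl_cons, PySem.Set.update_cons]
    by_cases hx : x ∈ s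
    · rw [if_pos (by simpa [PySem.Set.contains_iff] using hx),
          PySem.Set.add_of_mem hx]
      exact ih s
    · rw [if_neg (by simpa [PySem.Set.contains_iff] using hx),
          PySem.Set.add_of_not_mem hx]
      have : (if q x then s.filter q ++ [x] else s.filter q)
          = (s ++ [x]).filter q := by
        by_cases hq : q x <;> simp [hq, List.filter_append]
      rw [this]
      exact ih (s ++ [x])

-- the strictly-increasing order of B's output under A's index key
theorem pvPairwise (l : List String) :
    (((PySem.Set.ofList l.reverse) : List String).reverse).Pairwise
      (fun a b => (pvBuild l).getD a 0 < (pvBuild l).getD b 0) := by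
  induction l using List.reverseRecOn with
  | nil => simp [PySem.Set.ofList]
  | append_singleton t x ih =>
    have hrev : (t ++ [x]).reverse = x :: t.reverse := by simp
    rw [hrev, PySem.Set.ofList_cons]
    simp only [List.reverse_cons]
    apply List.pairwise_append.mpr
    refine ⟨?_, ?_, ?_⟩
    · have hsub : (PySem.Set.discard (PySem.Set.ofList t.reverse) x : List String).reverse.Sublist
          ((PySem.Set.ofList t.reverse : List String)).reverse := by
        exact List.filter_sublist.reverse
      have hp := ih.sublist hsub
      apply hp.imp_of_mem
      intro a b ha hb hab
      have hmem : ∀ y ∈ (PySem.Set.discard (PySem.Set.ofList t.reverse) x : List String).reverse,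
          y ≠ x := by
        intro y hy
        simp only [List.mem_reverse] at hy
        exact ((PySem.Set.mem_discard _ _ _).mp hy).2
      have hgd : ∀ y, y ≠ x → (pvBuild (t ++ [x])).getD y 0 = (pvBuild t).getD y 0 := by
        intro y hy
        rw [pvBuild_append, PySem.Dict.getD_insert, if_neg hy]
      rw [hgd a (hmem a ha), hgd b (hmem b hb)]
      exact hab
    · simp
    · intro a ha b hb
      simp only [List.mem_singleton] at hb
      subst hb
      simp only [List.mem_reverse] at ha
      have hax : a ≠ b := ((PySem.Set.mem_discard _ _ _).mp ha).2
      have hat : a ∈ t := by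
        have := ((PySem.Set.mem_discard _ _ _).mp ha).1
        simpa [PySem.Set.mem_ofList] using this
      have htne : t ≠ [] := by rintro rfl; simp at hat
      have hx : (pvBuild (t ++ [b])).getD b 0 = (t.length : Int) := by
        rw [pvBuild_append, PySem.Dict.getD_insert, if_pos rfl]
      have ha' : (pvBuild (t ++ [b])).getD a 0 = (pvBuild t).getD a 0 := by
        rw [pvBuild_append, PySem.Dict.getD_insert, if_neg hax]
      rw [hx, ha']
      rw [PySem.Dict.getD_eq_get?_getD]
      cases hg : (pvBuild t).get? a with
      | none =>
        simp only [Option.getD_none]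
        have : 0 < t.length := List.length_pos_iff.mpr htne
        exact_mod_cast this
      | some i => simpa using pvBuild_lt t a i hg

-- ---------- trie lemmas ----------

theorem children_mk (ch : PTrieChildren) : (PTrie.mk ch).children = ch := rfl

theorem trieGet?_nil_path (t : PTrie) : trieGet? t [] = some t := rfl

theorem trieGet?_cons (ch : PTrieChildren) (d : Char) (ps : List Char) :
    trieGet? (PTrie.mk ch) (d :: ps)
      = match childGet? ch d with | none => none | some u => trieGet? u ps := rfl

theorem trieInsert_cons (ch : PTrieChildren) (c : Char) (cs : List Char) :
    trieInsert (PTrie.mk ch) (c :: cs)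
      = PTrie.mk (childSet ch c
          (trieInsert ((childGet? ch c).getD (PTrie.mk PTrieChildren.nil)) cs)) := rfl

theorem childGet?_childSet : ∀ (ch : PTrieChildren) (c : Char) (v : PTrie) (e : Char),
    childGet? (childSet ch c v) e = if e = c then some v else childGet? ch e
  | .nil, c, v, e => by simp [childSet, childGet?]
  | .cons d t rest, c, v, e => by
    by_cases hdc : d = c
    · subst hdc
      by_cases hed : e = d <;> simp [childSet, childGet?, hed]
    · by_cases hed : e = d
      · subst hed
        simp [childSet, childGet?, hdc]
      · simp [childSet, childGet?, hdc, hed, childGet?_childSet rest c v e]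

theorem isNilC_childSet (ch : PTrieChildren) (c : Char) (v : PTrie) :
    isNilC (childSet ch c v) = false := by
  cases ch with
  | nil => simp [childSet, isNilC]
  | cons d t rest =>
    by_cases hdc : d = c <;> simp [childSet, hdc, isNilC]

-- reachability / strict-extension predicates on a trie node
def pvReach (t : PTrie) (p : List Char) : Bool := (trieGet? t p).isSome
def pvStrict (t : PTrie) (p : List Char) : Bool :=
  match trieGet? t p with
  | some u => !isNilC u.children
  | none => false

theorem pvReach_cons (ch : PTrieChildren) (d : Char) (ps : List Char) :
    pvReach (PTrie.mk ch) (d :: ps)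
      = match childGet? ch d with | none => false | some u => pvReach u ps := by
  rw [pvReach, trieGet?_cons]
  cases childGet? ch d <;> simp [pvReach]

theorem pvStrict_cons (ch : PTrieChildren) (d : Char) (ps : List Char) :
    pvStrict (PTrie.mk ch) (d :: ps)
      = match childGet? ch d with | none => false | some u => pvStrict u ps := by
  rw [pvStrict, trieGet?_cons]
  cases childGet? ch d <;> simp [pvStrict]

theorem pvReach_nilT (p : List Char) :
    pvReach (PTrie.mk PTrieChildren.nil) p = decide (p = []) := by
  cases p with
  | nil => rfl
  | cons c cs => simp [pvReach_cons, childGet?]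

theorem pvStrict_nilT (p : List Char) :
    pvStrict (PTrie.mk PTrieChildren.nil) p = false := by
  cases p with
  | nil => rfl
  | cons c cs => simp [pvStrict_cons, childGet?]

theorem pvReach_insert (x : List Char) (t : PTrie) (p : List Char) :
    pvReach (trieInsert t x) p = (pvReach t p || decide (p <+: x)) := by
  induction x generalizing t p with
  | nil =>
    cases p with
    | nil => simp [trieInsert, pvReach, trieGet?_nil_path]
    | cons d ps => simp [trieInsert]
  | cons c xs ih =>
    cases t with
    | mk ch =>
      cases p with
      | nil => simp [pvReach, trieGet?_nil_path]
      | cons d ps =>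
        rw [trieInsert_cons, pvReach_cons, pvReach_cons, childGet?_childSet]
        by_cases hdc : d = c
        · subst hdc
          rw [if_pos rfl]
          cases hg : childGet? ch d with
          | some u =>
            simp only [hg, Option.getD_some] at *
            rw [ih u ps]
            simp [List.cons_prefix_cons]
          | none =>
            simp only [hg, Option.getD_none] at *
            rw [ih (PTrie.mk PTrieChildren.nil) ps, pvReach_nilT]
            simp only [List.cons_prefix_cons, true_and]
            cases ps with
            | nil => simp
            | cons e es => simp
        · rw [if_neg hdc]
          have : decide (d :: ps <+: c :: xs) = false := by
            simp [List.cons_prefix_cons, hdc]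
          rw [this]
          cases hg : childGet? ch d <;> simp

theorem pvStrict_insert (x : List Char) (t : PTrie) (p : List Char) :
    pvStrict (trieInsert t x) p
      = (pvStrict t p || (decide (p <+: x) && !decide (p = x))) := by
  induction x generalizing t p with
  | nil =>
    cases p with
    | nil => simp [trieInsert]
    | cons d ps => simp [trieInsert]
  | cons c xs ih =>
    cases t with
    | mk ch =>
      cases p with
      | nil =>
        rw [trieInsert_cons]
        simp [pvStrict, trieGet?_nil_path, children_mk, isNilC_childSet]
      | cons d ps =>
        rw [trieInsert_cons, pvStrict_cons, pvStrict_cons, childGet?_childSet]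
        have hpe : (decide (d :: ps <+: c :: xs) && !decide (d :: ps = c :: xs))
            = (if d = c then (decide (ps <+: xs) && !decide (ps = xs)) else false) := by
          by_cases hdc : d = c
          · subst hdc
            simp [List.cons_prefix_cons]
          · simp [List.cons_prefix_cons, hdc]
        rw [hpe]
        by_cases hdc : d = c
        · subst hdc
          rw [if_pos rfl, if_pos rfl]
          cases hg : childGet? ch d with
          | some u =>
            simp only [Option.getD_some]
            rw [ih u ps]
          | none =>
            simp only [Option.getD_none]
            rw [ih (PTrie.mk PTrieChildren.nil) ps, pvStrict_nilT]
        · rw [if_neg hdc, if_neg hdc]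
          cases hg : childGet? ch d <;> simp

theorem pvReach_foldl (L : List (List Char)) (t : PTrie) (p : List Char) :
    pvReach (L.foldl trieInsert t) p
      = (pvReach t p || L.any (fun x => decide (p <+: x))) := by
  induction L generalizing t with
  | nil => simp
  | cons x L ih =>
    simp only [List.foldl_cons, List.any_cons, ih, pvReach_insert, Bool.or_assoc]

theorem pvStrict_foldl (L : List (List Char)) (t : PTrie) (p : List Char) :
    pvStrict (L.foldl trieInsert t) p
      = (pvStrict t p || L.any (fun x => decide (p <+: x) && !decide (p = x))) := by
  induction L generalizing t with
  | nil => simp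
  | cons x L ih =>
    simp only [List.foldl_cons, List.any_cons, ih, pvStrict_insert, Bool.or_assoc]

-- y ∈ pvSufs w ↔ y is a nonempty proper suffix of w
theorem pvMem_sufs (y w : String) :
    y ∈ pvSufs w ↔ (y.toList ≠ [] ∧ y.toList <:+ w.toList ∧ y.toList ≠ w.toList) := by
  constructor
  · intro h
    simp only [pvSufs, List.mem_map] at h
    obtain ⟨i, hi, hy⟩ := h
    rw [PySem.List.mem_pyRange_one] at hi
    have hWL : w.toList.length = w.length := by simp
    have hi' : 1 ≤ i ∧ i < (w.length : Int) := by simpa using hi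
    obtain ⟨hi1, hi2⟩ := hi'
    have h0 : 0 ≤ i := by omega
    have hyl : y.toList = w.toList.drop i.toNat := by
      rw [← hy]
      simp [PySem.List.slice_from _ h0]
    have hbound : i.toNat < w.toList.length := by omega
    have h1 : 1 ≤ i.toNat := by omega
    refine ⟨?_, ?_, ?_⟩
    · rw [hyl]
      intro hnil
      have := List.drop_eq_nil_iff.mp hnil
      omega
    · rw [hyl]; exact List.drop_suffix _ _
    · rw [hyl]
      intro heq
      have := congrArg List.length heq
      simp [List.length_drop] at this
      omega
  · rintro ⟨hne, hsuf, hneq⟩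
    obtain ⟨pre, hpre⟩ := hsuf
    have hWL : w.toList.length = w.length := by simp
    have hYL : y.toList.length = y.length := by simp
    have hypos : 0 < y.toList.length := List.length_pos_iff.mpr hne
    have hlen0 : pre.length + y.toList.length = w.toList.length := by
      have := congrArg List.length hpre
      rwa [List.length_append] at this
    have hlt : pre.length < w.toList.length := by omega
    have hpos : 0 < pre.length := by
      rcases Nat.eq_zero_or_pos pre.length with h | h
      · exfalso
        have : pre = [] := List.eq_nil_of_length_eq_zero h
        subst this
        simp at hpre
        exact hneq hpre
      · exact h
    simp only [pvSufs, List.mem_map]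
    refine ⟨(pre.length : Int), ?_, ?_⟩
    · rw [PySem.List.mem_pyRange_one]
      have hlen : PySem.Str.len w = ((w.toList.length : Nat) : Int) := by simp
      constructor
      · exact_mod_cast hpos
      · rw [hlen]; exact_mod_cast hlt
    · apply String.toList_inj.mp
      have h0 : (0:Int) ≤ (pre.length : Int) := by positivity
      simp [PySem.List.slice_from _ h0]
      rw [← hpre]
      simp

-- B's trie root, as the port builds it
def pvRoot (words : List String) : PTrie :=
  (PySem.Set.ofList words).foldl
    (fun r w => trieInsert r w.toList.reverse) (PTrie.mk PTrieChildren.nil)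

theorem pvKeep_eq_not_strict (t : PTrie) (y : String) (hne : y ≠ "")
    (h : pvReach t y.toList.reverse = true) :
    pvKeep t y = !pvStrict t y.toList.reverse := by
  unfold pvKeep pvStrict
  unfold pvReach at h
  rw [show (y == "") = false from beq_eq_false_iff_ne.mpr hne, Bool.false_or]
  cases hg : trieGet? t y.toList.reverse with
  | none => rw [hg] at h; simp at h
  | some u => simp

theorem pvAny_iff (words : List String) (y : String) (hynil : y.toList ≠ []) :
    ((PySem.Set.ofList words : List String).any
        (fun w => decide (y.toList.reverse <+: w.toList.reverse)
                  && !decide (y.toList.reverse = w.toList.reverse)) = true)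
      ↔ y ∈ (PySem.Set.ofList words : List String).flatMap pvSufs := by
  rw [List.any_eq_true, List.mem_flatMap]
  constructor
  · rintro ⟨w, hw, hb⟩
    simp only [Bool.and_eq_true, decide_eq_true_eq, Bool.not_eq_true',
               decide_eq_false_iff_not] at hb
    obtain ⟨hpre, hne⟩ := hb
    have hsuf : y.toList <:+ w.toList := List.reverse_prefix.mp hpre
    have hneq : y.toList ≠ w.toList := fun h => hne (by rw [h])
    exact ⟨w, hw, (pvMem_sufs y w).mpr ⟨hynil, hsuf, hneq⟩⟩
  · rintro ⟨w, hw, hmem⟩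
    obtain ⟨hynil, hsuf, hneq⟩ := (pvMem_sufs y w).mp hmem
    refine ⟨w, hw, ?_⟩
    simp only [Bool.and_eq_true, decide_eq_true_eq, Bool.not_eq_true',
               decide_eq_false_iff_not]
    exact ⟨List.reverse_prefix.mpr hsuf, fun h => hneq (List.reverse_inj.mp h)⟩

theorem pvNotMem_sufs_empty (words : List String) :
    ((PySem.Set.ofList words : List String).flatMap pvSufs).contains "" = false := by
  rw [Bool.eq_false_iff]
  intro h
  rw [List.contains_eq_mem, decide_eq_true_eq, List.mem_flatMap] at h
  obtain ⟨w, _, hm⟩ := h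
  exact ((pvMem_sufs "" w).mp hm).1 rfl

theorem pvKeep_eq (words : List String) (y : String) (hy : y ∈ words) :
    pvKeep (pvRoot words) y
      = !((PySem.Set.ofList words : List String).flatMap pvSufs).contains y := by
  by_cases hyemp : y = ""
  · subst hyemp
    rw [pvNotMem_sufs_empty]
    simp [pvKeep]
  have hynil : y.toList ≠ [] := fun h0 => hyemp (String.toList_inj.mp (by simpa using h0))
  have hfold : pvRoot words
      = ((PySem.Set.ofList words : List String).map (fun w => w.toList.reverse)).foldl
          trieInsert (PTrie.mk PTrieChildren.nil) := by
    rw [List.foldl_map]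
    rfl
  have hyD : y ∈ (PySem.Set.ofList words : List String) := by
    rw [PySem.Set.mem_ofList]; exact hy
  have hreach : pvReach (pvRoot words) y.toList.reverse = true := by
    rw [hfold, pvReach_foldl, List.any_map]
    have : ((PySem.Set.ofList words : List String).any
        ((fun x => decide (y.toList.reverse <+: x)) ∘ fun w => w.toList.reverse)) = true :=
      List.any_eq_true.mpr ⟨y, hyD, by simp⟩
    simp [this]
  rw [pvKeep_eq_not_strict _ _ hyemp hreach, hfold, pvStrict_foldl, pvStrict_nilT,
      Bool.false_or, List.any_map]
  have h2 := pvAny_iff words y hynil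
  have hc : ((PySem.Set.ofList words : List String).flatMap pvSufs).contains y
      = decide (y ∈ (PySem.Set.ofList words : List String).flatMap pvSufs) := by
    simp [List.contains_eq_mem]
  rw [hc]
  congr 1
  by_cases hmem : y ∈ (PySem.Set.ofList words : List String).flatMap pvSufs
  · rw [decide_eq_true hmem]
    exact h2.mpr hmem
  · rw [decide_eq_false hmem]
    exact Bool.eq_false_iff.mpr (fun h => hmem (h2.mp h))

-- the two lists both sides join are the same list
theorem pvLists_eq (words : List String) :
    PySem.List.sorted
      ((PySem.Set.ofList words : List String).foldl (fun ws word =>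
        (PySem.List.pyRange 1 (PySem.Str.len word) 1).foldl
          (fun ws i => PySem.Set.discard ws (PySem.Str.slice word (some i) none)) ws)
        (PySem.Set.ofList words))
      (fun w => (pvBuild words).getD w 0) false
    = (words.reverse.foldl
        (fun (p : PySem.Set String × List String) w =>
          if PySem.Set.contains p.1 w then p
          else (PySem.Set.add p.1 w,
                if pvKeep (pvRoot words) w then p.2 ++ [w] else p.2))
        (PySem.Set.empty, [])).2.reverse := by
  have hA : ((PySem.Set.ofList words : List String).foldl (fun ws word =>
        (PySem.List.pyRange 1 (PySem.Str.len word) 1).foldl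
          (fun ws i => PySem.Set.discard ws (PySem.Str.slice word (some i) none)) ws)
        (PySem.Set.ofList words))
      = (PySem.Set.ofList words : List String).filter
          (fun y => !((PySem.Set.ofList words : List String).flatMap pvSufs).contains y) := by
    have h1 : ∀ (ws : PySem.Set String) (word : String),
        (PySem.List.pyRange 1 (PySem.Str.len word) 1).foldl
          (fun ws i => PySem.Set.discard ws (PySem.Str.slice word (some i) none)) ws
        = (pvSufs word).foldl PySem.Set.discard ws := by
      intro ws word
      rw [pvSufs, List.foldl_map]
    simp only [h1]
    rw [pvDouble, pvDiscard_foldl]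
  have hB : (words.reverse.foldl
        (fun (p : PySem.Set String × List String) w =>
          if PySem.Set.contains p.1 w then p
          else (PySem.Set.add p.1 w,
                if pvKeep (pvRoot words) w then p.2 ++ [w] else p.2))
        (PySem.Set.empty, [])).2
      = (PySem.Set.ofList words.reverse : List String).filter
          (fun y => !((PySem.Set.ofList words : List String).flatMap pvSufs).contains y) := by
    have hb := pvBloop (fun w => pvKeep (pvRoot words) w) words.reverse PySem.Set.empty
    have hempty : (PySem.Set.empty : PySem.Set String).filter
        (fun w => pvKeep (pvRoot words) w) = [] := rfl
    rw [hempty] at hb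
    have hupd : PySem.Set.update (PySem.Set.empty : PySem.Set String) words.reverse
        = PySem.Set.ofList words.reverse := (PySem.Set.ofList_eq_foldl words.reverse).symm
    rw [hupd] at hb
    rw [hb]
    apply List.filter_congr
    intro y hymem
    have hy : y ∈ words := by
      rw [PySem.Set.mem_ofList, List.mem_reverse] at hymem
      exact hymem
    exact pvKeep_eq words y hy
  rw [hB, hA]
  apply PySem.List.sorted_eq_of_perm_of_pairwise_lt
  · refine (List.reverse_perm _).trans (List.Perm.filter _ ?_)
    apply (List.perm_ext_iff_of_nodup (PySem.Set.nodup_ofList _) (PySem.Set.nodup_ofList _)).mpr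
    intro a
    simp [PySem.Set.mem_ofList]
  · rw [← List.filter_reverse]
    exact (pvPairwise words).filter _

-- ===== VERDICT (by name: the statement is the Claim_ definition above) =====
theorem shortest_ref_string_spec : Claim_equal_shortest_ref_string := by
  intro words _
  unfold Spec_shortest_ref_string shortest_ref_string shortest_ref_string_alt
  simp only []
  rw [show (List.foldl (fun (d : PySem.Dict String Int) p => d.insert p.2 p.1)
        PySem.Dict.empty (PySem.List.enumerate words)) = pvBuild words from rfl]
  rw [show ((PySem.Set.ofList words).foldl
        (fun r w => trieInsert r w.toList.reverse) (PTrie.mk PTrieChildren.nil)) = pvRoot words from rfl]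
  rw [pvLists_eq words]
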